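-- pv_equiv track=rewrite | github.com/garnet1985/new-tea-quant | userspace/data_source/handlers/index_klines/handler.py | _parse_entity_date_ranges
-- ===== SOURCE A (Python) =====
-- from typing import List, Dict, Any, Optional, Tuple
--
-- def _parse_entity_date_ranges(
--     entity_date_ranges: Dict[str, Tuple[str, str]]
-- ) -> Dict[str, Dict[str, Tuple[str, str]]]:
--     """解析 entity_date_ranges，将 "id::term" 转为按 index 分组的 {term: (start, end)}。"""
--     result: Dict[str, Dict[str, Tuple[str, str]]] = {}
--     for key, date_range in entity_date_ranges.items():
--         if "::" not in key:
--             index_id = key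
--             term = None
--         else:
--             parts = key.split("::")
--             index_id = parts[0]
--             term = parts[1] if len(parts) > 1 else None
--         if not index_id:
--             continue
--         if index_id not in result:
--             result[index_id] = {}
--         if term:
--             result[index_id][term] = date_range
--         else:
--             result[index_id]["default"] = date_range
--     return result
-- ===== SOURCE B (Python) =====
-- def _parse_entity_date_ranges(entity_date_ranges):
--     """Two-pass rewrite: parse every key into (index_id, term_key, range) triples,
--     then build each index's inner dict by grouping the parsed triples."""
--     parsed = []
--     for key, date_range in entity_date_ranges.items():
--         parts = key.split("::")
--         index_id = parts[0]
--         term = parts[1] if len(parts) > 1 else None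
--         if index_id:
--             parsed.append((index_id, term or "default", date_range))
--     result = {}
--     for index_id, _, _ in parsed:
--         if index_id not in result:
--             result[index_id] = {t: r for (i, t, r) in parsed if i == index_id}
--     return result
-- ===== Notes on version B (the rewrite author's own statement) =====
-- stated objective: alternative
-- what changed: Replaces A's single-pass incremental nested-dict updates with a two-pass pipeline: first parse all keys into filtered (index_id, term_key, range) triples, then for each first-occurring index_id build its whole inner dict at once by a grouping comprehension over the parsed list.
import Mathlib
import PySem

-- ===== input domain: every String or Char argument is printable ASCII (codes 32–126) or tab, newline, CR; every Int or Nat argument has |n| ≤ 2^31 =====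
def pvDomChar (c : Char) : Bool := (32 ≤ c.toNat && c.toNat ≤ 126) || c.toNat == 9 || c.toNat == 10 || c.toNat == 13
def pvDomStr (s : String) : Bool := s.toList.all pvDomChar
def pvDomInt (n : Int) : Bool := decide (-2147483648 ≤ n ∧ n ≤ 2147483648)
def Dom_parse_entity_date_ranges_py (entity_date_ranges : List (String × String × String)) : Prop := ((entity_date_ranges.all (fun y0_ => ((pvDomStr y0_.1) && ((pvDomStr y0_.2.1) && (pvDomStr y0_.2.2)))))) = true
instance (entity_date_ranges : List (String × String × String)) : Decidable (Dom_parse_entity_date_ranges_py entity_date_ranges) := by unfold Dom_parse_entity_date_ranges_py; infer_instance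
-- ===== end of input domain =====

-- B replaces A's single-pass incremental nested-dict updates by a two-pass parse-then-group
-- pipeline (same return value; objective: alternative decomposition).


-- ===== PORT A =====
-- Literal port of _parse_entity_date_ranges: one loop over the items, building the nested
-- dict incrementally.  key.split("::") is split? with the nonempty literal separator "::",
-- so `.getD []` never fires; parts[0] is `headD ""` (split never returns []);
-- result[index_id][term] = date_range is lookup-update-store on the nested PySem.Dict.
def parse_entity_date_ranges_py (entity_date_ranges : List (String × String × String)) :
    List (String × List (String × String × String)) :=
  let result : PySem.Dict String (PySem.Dict String (String × String)) :=
    entity_date_ranges.foldl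
      (fun result kv =>
        let key := kv.1
        let date_range := kv.2
        let it : String × Option String :=
          if PySem.Str.isIn "::" key = false then (key, none)
          else
            let parts := (PySem.Str.split? key "::").getD []
            (parts.headD "", if parts.length > 1 then parts[1]? else none)
        let index_id := it.1
        if index_id = "" then result
        else
          let result :=
            if result.contains index_id = false then result.insert index_id PySem.Dict.empty
            else result
          match it.2 with
          | some t =>
            if t ≠ "" then
              result.insert index_id ((result.getD index_id PySem.Dict.empty).insert t date_range)
            else
              result.insert index_id ((result.getD index_id PySem.Dict.empty).insert "default" date_range)
          | none =>
            result.insert index_id ((result.getD index_id PySem.Dict.empty).insert "default" date_range))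
      PySem.Dict.empty
  result.items.map (fun p => (p.1, p.2.items))

-- ===== PORT B =====
-- first pass of Source B: parse one (key, date_range) item into (index_id, term_key, date_range),
-- dropping items with an empty index_id
def pvParseB (kv : String × String × String) : Option (String × String × (String × String)) :=
  let parts := (PySem.Str.split? kv.1 "::").getD []
  let index_id := parts.headD ""
  let term : Option String := if parts.length > 1 then parts[1]? else none
  if index_id = "" then none
  else some (index_id,
    (match term with | some t => if t = "" then "default" else t | none => "default"),
    kv.2)

-- the grouping comprehension of Source B: {t: r for (i, t, r) in parsed if i == index_id}
def pvInnerB (parsed : List (String × String × (String × String))) (i : String) :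
    PySem.Dict String (String × String) :=
  PySem.Dict.ofList ((parsed.filter (fun x => x.1 == i)).map (fun x => x.2))

def parse_entity_date_ranges_py_alt (entity_date_ranges : List (String × String × String)) :
    List (String × List (String × String × String)) :=
  let parsed := entity_date_ranges.filterMap pvParseB
  let result : PySem.Dict String (PySem.Dict String (String × String)) :=
    parsed.foldl
      (fun result e =>
        if result.contains e.1 then result else result.insert e.1 (pvInnerB parsed e.1))
      PySem.Dict.empty
  result.items.map (fun p => (p.1, p.2.items))

-- ===== PRECONDITION & SPEC =====
def Spec_parse_entity_date_ranges_py (entity_date_ranges : List (String × String × String)) (out : List (String × List (String × String × String))) : Prop := out = parse_entity_date_ranges_py_alt entity_date_ranges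
instance (entity_date_ranges : List (String × String × String)) (out : List (String × List (String × String × String))) : Decidable (Spec_parse_entity_date_ranges_py entity_date_ranges out) := by unfold Spec_parse_entity_date_ranges_py; infer_instance

-- ===== CLAIM (what is proved, stated in full; the proofs are below) =====
def Claim_equal_parse_entity_date_ranges_py : Prop := ∀ (entity_date_ranges : List (String × String × String)), Dom_parse_entity_date_ranges_py entity_date_ranges → Spec_parse_entity_date_ranges_py entity_date_ranges (parse_entity_date_ranges_py entity_date_ranges)

-- ===== LEMMAS AND PROOFS =====

-- the single step of A's loop, rephrased on an already-parsed triple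
def pvStep (d : PySem.Dict String (PySem.Dict String (String × String)))
    (e : String × String × (String × String)) :
    PySem.Dict String (PySem.Dict String (String × String)) :=
  let base := if d.contains e.1 = false then d.insert e.1 PySem.Dict.empty else d
  base.insert e.1 ((base.getD e.1 PySem.Dict.empty).insert e.2.1 e.2.2)

-- first occurrences of the index ids of a parsed list
def pvIds (p : List (String × String × (String × String))) : List String :=
  PySem.Set.ofList (p.map (·.1))

-- canonical grouped dict both loops produce
def pvCanon (p : List (String × String × (String × String))) :
    PySem.Dict String (PySem.Dict String (String × String)) :=
  PySem.Dict.mk ((pvIds p).map (fun i => (i, pvInnerB p i)))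

-- splitOn.go when the separator occurs nowhere: everything goes into the current chunk
theorem pv_go_no_occur (sep : List Char) :
    ∀ (fuel : Nat) (l cur : List Char) (acc : List (List Char)),
      (∀ j, ¬ sep <+: l.drop j) →
      PySem.Chars.splitOn.go sep fuel l cur acc = ((cur.reverse ++ l) :: acc).reverse := by
  intro fuel
  induction fuel with
  | zero => intro l cur acc _; rw [PySem.Chars.splitOn.go]
  | succ n ih =>
    intro l cur acc hno
    cases l with
    | nil =>
      rw [PySem.Chars.splitOn.go]
      · simp
      · omega
    | cons c rest =>
      have hpre : sep.isPrefixOf (c :: rest) = false := by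
        rw [Bool.eq_false_iff]
        intro hp
        exact hno 0 (by simpa using List.isPrefixOf_iff_prefix.mp hp)
      rw [PySem.Chars.splitOn.go]
      simp only [hpre, Bool.false_eq_true, if_false]
      rw [ih rest (c :: cur) acc (fun j hj => hno (j + 1) (by simpa using hj))]
      simp

theorem pv_splitOn_no_occur (sep l : List Char)
    (h : PySem.Chars.isIn sep l = false) : PySem.Chars.splitOn l sep = [l] := by
  have hno : ∀ j, ¬ sep <+: l.drop j := by
    intro j hj
    have := (PySem.Chars.exists_prefix_drop_iff_isIn sep l).mp ⟨j, hj⟩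
    rw [this] at h; exact absurd h (by simp)
  unfold PySem.Chars.splitOn
  rw [pv_go_no_occur sep (l.length + 1) l [] [] hno]
  simp

-- "::" not in key  →  key.split("::") = [key]
theorem pv_split_no_occur (key : String) (h : PySem.Str.isIn "::" key = false) :
    PySem.Str.split? key "::" = some [key] := by
  rw [PySem.Str.isIn_eq] at h
  unfold PySem.Str.split? PySem.Chars.split?
  rw [pv_splitOn_no_occur _ _ h]
  simp

-- A's loop body is exactly: parse, then pvStep
theorem pv_bodyA_eq :
    (fun (result : PySem.Dict String (PySem.Dict String (String × String)))
         (kv : String × String × String) =>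
        let key := kv.1
        let date_range := kv.2
        let it : String × Option String :=
          if PySem.Str.isIn "::" key = false then (key, none)
          else
            let parts := (PySem.Str.split? key "::").getD []
            (parts.headD "", if parts.length > 1 then parts[1]? else none)
        let index_id := it.1
        if index_id = "" then result
        else
          let result :=
            if result.contains index_id = false then result.insert index_id PySem.Dict.empty
            else result
          match it.2 with
          | some t =>
            if t ≠ "" then
              result.insert index_id ((result.getD index_id PySem.Dict.empty).insert t date_range)
            else
              result.insert index_id ((result.getD index_id PySem.Dict.empty).insert "default" date_range)
          | none =>
            result.insert index_id ((result.getD index_id PySem.Dict.empty).insert "default" date_range))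
    = (fun result kv => match pvParseB kv with | none => result | some e => pvStep result e) := by
  funext result kv
  show _ = (match pvParseB kv with | none => result | some e => pvStep result e)
  cases hiso : PySem.Str.isIn "::" kv.1 with
  | false =>
    simp only [pvParseB, pvStep, pv_split_no_occur kv.1 hiso, hiso]
    simp only [Option.getD_some, List.headD_cons, List.length_cons, List.length_nil]
    norm_num
    by_cases hk : kv.1 = "" <;> simp [hk]
  | true =>
    simp only [pvParseB, pvStep, hiso]
    norm_num
    generalize (PySem.Str.split? kv.1 "::").getD [] = parts
    cases parts with
    | nil => simp
    | cons a rest =>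
      cases rest with
      | nil =>
        by_cases ha : a = "" <;> simp [ha]
      | cons b rest' =>
        by_cases ha : a = "" <;> by_cases hb : b = "" <;>
          simp [ha, hb]

theorem pv_keys_canon_shape (s : List String) (g : String → PySem.Dict String (String × String)) :
    (PySem.Dict.mk (s.map (fun i => (i, g i)))).keys = s := by
  simp [PySem.Dict.keys, List.map_map, Function.comp_def]

theorem pv_contains_canon_shape (s : List String) (g : String → PySem.Dict String (String × String))
    (k : String) : (PySem.Dict.mk (s.map (fun i => (i, g i)))).contains k = decide (k ∈ s) := by
  rw [PySem.Dict.contains_eq_decide_mem_keys, pv_keys_canon_shape]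

theorem pv_ids_append (p : List (String × String × (String × String)))
    (x : String × String × (String × String)) :
    pvIds (p ++ [x]) = PySem.Set.add (pvIds p) x.1 := by
  simp [pvIds, PySem.Set.ofList_eq_foldl, List.foldl_append]

-- an id absent from the parsed list has an empty group
theorem pv_inner_empty (p : List (String × String × (String × String))) (i : String)
    (h : i ∉ p.map (·.1)) : pvInnerB p i = PySem.Dict.empty := by
  unfold pvInnerB
  have : p.filter (fun x => x.1 == i) = [] := by
    rw [List.filter_eq_nil_iff]
    intro x hx
    simp only [beq_iff_eq]
    intro hxi
    exact h (List.mem_map.mpr ⟨x, hx, hxi⟩)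
  rw [this]
  rfl

theorem pv_inner_append (p : List (String × String × (String × String)))
    (x : String × String × (String × String)) (i : String) :
    pvInnerB (p ++ [x]) i =
      if x.1 = i then (pvInnerB p i).insert x.2.1 x.2.2 else pvInnerB p i := by
  unfold pvInnerB
  rw [List.filter_append]
  by_cases hx : x.1 = i
  · simp only [List.filter_cons, List.filter_nil, hx, beq_self_eq_true, if_pos, List.map_append]
    simp [PySem.Dict.ofList, PySem.Dict.update, List.foldl_append]
  · have : [x].filter (fun y => y.1 == i) = [] := by simp [hx]
    simp [this, hx]

theorem pv_foldl_parse (l : List (String × String × String))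
    (d : PySem.Dict String (PySem.Dict String (String × String))) :
    l.foldl (fun result kv => match pvParseB kv with | none => result | some e => pvStep result e) d
      = (l.filterMap pvParseB).foldl pvStep d := by
  induction l generalizing d with
  | nil => rfl
  | cons a t ih =>
    cases h : pvParseB a <;> simp [h, ih]

theorem pv_foldl_step_canon (p : List (String × String × (String × String))) :
    p.foldl pvStep PySem.Dict.empty = pvCanon p := by
  induction p using List.reverseRecOn with
  | nil => rfl
  | append_singleton p x ih =>
    rw [List.foldl_append, List.foldl_cons, List.foldl_nil, ih]
    have hnd : (pvIds p).Nodup := PySem.Set.nodup_ofList _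
    show pvStep (pvCanon p) x = pvCanon (p ++ [x])
    unfold pvCanon
    by_cases hmem : x.1 ∈ pvIds p
    · -- existing index id: replace its inner dict in place
      have hcont : (PySem.Dict.mk ((pvIds p).map (fun i => (i, pvInnerB p i)))).contains x.1 = true := by
        rw [pv_contains_canon_shape]; simpa using hmem
      have hgetD : (PySem.Dict.mk ((pvIds p).map (fun i => (i, pvInnerB p i)))).getD x.1
          PySem.Dict.empty = pvInnerB p x.1 := by
        apply PySem.Dict.getD_of_mem_items
        · exact List.mem_map.mpr ⟨x.1, hmem, rfl⟩
        · rw [pv_keys_canon_shape]; exact hnd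
      unfold pvStep
      simp only [hcont, Bool.true_eq_false, if_false, hgetD]
      apply PySem.Dict.ext
      rw [PySem.Dict.items_insert_of_contains _ _ hcont]
      show (((pvIds p).map (fun i => (i, pvInnerB p i))).map _) = _
      rw [pv_ids_append, List.map_map]
      have hadd : PySem.Set.add (pvIds p) x.1 = pvIds p := by
        unfold PySem.Set.add
        have : PySem.Set.contains (pvIds p) x.1 = true := by
          simpa [PySem.Set.contains] using hmem
        rw [this]; simp
      rw [hadd]
      apply List.map_congr_left
      intro i hi
      simp only [Function.comp]
      by_cases hix : i = x.1
      · subst hix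
        simp [pv_inner_append]
      · have : (i == x.1) = false := by simp [hix]
        simp only [this, Bool.false_eq_true, if_false]
        rw [pv_inner_append]
        have hxi : x.1 ≠ i := Ne.symm hix
        simp [hxi]
    · -- fresh index id: append a one-entry inner dict
      have hcont : (PySem.Dict.mk ((pvIds p).map (fun i => (i, pvInnerB p i)))).contains x.1 = false := by
        rw [pv_contains_canon_shape]; simpa using hmem
      unfold pvStep
      rw [if_pos hcont]
      simp only [PySem.Dict.getD_insert_self, PySem.Dict.insert_insert_self]
      apply PySem.Dict.ext
      rw [PySem.Dict.items_insert_of_not_contains _ _ hcont]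
      rw [pv_ids_append]
      have hadd : PySem.Set.add (pvIds p) x.1 = pvIds p ++ [x.1] := by
        unfold PySem.Set.add
        have : PySem.Set.contains (pvIds p) x.1 = false := by
          simpa [PySem.Set.contains] using hmem
        rw [this]; simp
      rw [hadd, List.map_append]
      show _ ++ _ = _ ++ _
      congr 1
      · apply List.map_congr_left
        intro i hi
        rw [pv_inner_append]
        have : ¬ x.1 = i := fun h => hmem (h ▸ hi)
        simp [this]
      · have hnotin : x.1 ∉ p.map (·.1) := by
          rw [← PySem.Set.mem_ofList (xs := p.map (·.1))]; exact hmem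
        rw [List.map_singleton, pv_inner_append]
        simp [pv_inner_empty p x.1 hnotin]

theorem pv_foldl_group_canon (p₀ : List (String × String × (String × String))) :
    ∀ (p : List (String × String × (String × String))) (s : List String),
      (p.foldl
        (fun result e =>
          if result.contains e.1 = true then result else result.insert e.1 (pvInnerB p₀ e.1))
        (PySem.Dict.mk (s.map (fun i => (i, pvInnerB p₀ i)))))
      = PySem.Dict.mk ((PySem.Set.update s (p.map (·.1))).map (fun i => (i, pvInnerB p₀ i))) := by
  intro p
  induction p with
  | nil => intro s; rfl
  | cons e t ih =>
    intro s
    rw [List.foldl_cons]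
    by_cases hmem : e.1 ∈ s
    · have hcont : (PySem.Dict.mk (s.map (fun i => (i, pvInnerB p₀ i)))).contains e.1 = true := by
        rw [pv_contains_canon_shape]; simpa using hmem
      have hadd : PySem.Set.add s e.1 = s := by
        unfold PySem.Set.add
        have : PySem.Set.contains s e.1 = true := by simpa [PySem.Set.contains] using hmem
        rw [this]; simp
      rw [if_pos hcont]
      rw [ih s]
      show _ = PySem.Dict.mk ((PySem.Set.update (PySem.Set.add s e.1) _).map _)
      rw [hadd]
    · have hcont : (PySem.Dict.mk (s.map (fun i => (i, pvInnerB p₀ i)))).contains e.1 = false := by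
        rw [pv_contains_canon_shape]; simpa using hmem
      have hadd : PySem.Set.add s e.1 = s ++ [e.1] := by
        unfold PySem.Set.add
        have : PySem.Set.contains s e.1 = false := by simpa [PySem.Set.contains] using hmem
        rw [this]; simp
      simp only [hcont, Bool.false_eq_true, if_false]
      have hins : (PySem.Dict.mk (s.map (fun i => (i, pvInnerB p₀ i)))).insert e.1 (pvInnerB p₀ e.1)
          = PySem.Dict.mk ((s ++ [e.1]).map (fun i => (i, pvInnerB p₀ i))) := by
        apply PySem.Dict.ext
        rw [PySem.Dict.items_insert_of_not_contains _ _ hcont]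
        simp
      rw [hins, ih (s ++ [e.1])]
      show _ = PySem.Dict.mk ((PySem.Set.update (PySem.Set.add s e.1) _).map _)
      rw [hadd]

-- ===== VERDICT (by name: the statement is the Claim_ definition above) =====
theorem parse_entity_date_ranges_py_spec : Claim_equal_parse_entity_date_ranges_py := by
  intro l _
  unfold Spec_parse_entity_date_ranges_py
  show parse_entity_date_ranges_py l = parse_entity_date_ranges_py_alt l
  unfold parse_entity_date_ranges_py parse_entity_date_ranges_py_alt
  rw [pv_bodyA_eq, pv_foldl_parse, pv_foldl_step_canon]
  have h := pv_foldl_group_canon (l.filterMap pvParseB) (l.filterMap pvParseB) []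
  simp only [List.map_nil] at h
  rw [show (PySem.Dict.mk ([] : List (String × PySem.Dict String (String × String)))) = PySem.Dict.empty from rfl] at h
  show (pvCanon (l.filterMap pvParseB)).items.map (fun p => (p.1, p.2.items))
      = ((l.filterMap pvParseB).foldl
          (fun result e =>
            if result.contains e.1 = true then result
            else result.insert e.1 (pvInnerB (l.filterMap pvParseB) e.1))
          PySem.Dict.empty).items.map (fun p => (p.1, p.2.items))
  rw [h]
  unfold pvCanon pvIds
  rw [PySem.Set.ofList_eq_foldl]
  rfl
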